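-- pv_equiv track=rewrite | github.com/minseokheo/study | 프로그래머스/lv2/17677. ［1차］ 뉴스 클러스터링/［1차］ 뉴스 클러스터링.py | strtoset
-- ===== SOURCE A (Python) =====
-- def strtoset(s):
--     s = s.lower()
--     st = ''
--     sset = []
--     for i in range(len(s)):
--         if i == 0 and s[i].isalpha():
--             st += s[i]
--         else:
--             if s[i].isalpha():
--                 st += s[i]
--             else:
--                 st = ''
--             if len(st) == 2:
--                 sset.append(st)
--                 st = s[i]
--     return sset
-- ===== SOURCE B (Python) =====
-- def strtoset(s):
--     s = s.lower()
--     return [a + b for a, b in zip(s, s[1:]) if a.isalpha() and b.isalpha()]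
-- ===== Notes on version B (the rewrite author's own statement) =====
-- stated objective: simpler
-- what changed: Replaces A's stateful accumulator-with-reset index loop by a stateless comprehension over adjacent character pairs zip(s, s[1:]), keeping a pair exactly when both characters are alphabetic.
import Mathlib
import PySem

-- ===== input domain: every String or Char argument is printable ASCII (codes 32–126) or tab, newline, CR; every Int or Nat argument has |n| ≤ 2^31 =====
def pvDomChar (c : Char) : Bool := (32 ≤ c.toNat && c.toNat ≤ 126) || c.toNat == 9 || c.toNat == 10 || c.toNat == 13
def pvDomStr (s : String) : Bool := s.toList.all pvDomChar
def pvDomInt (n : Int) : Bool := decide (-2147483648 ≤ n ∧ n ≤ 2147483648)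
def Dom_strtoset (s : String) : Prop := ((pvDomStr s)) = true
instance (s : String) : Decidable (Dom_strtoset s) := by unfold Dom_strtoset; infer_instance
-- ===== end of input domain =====

-- B replaces A's stateful accumulator-with-reset loop by a stateless scan of adjacent pairs (simpler; same cost).

-- ===== PORT A =====
-- one loop-body step of A: p = (i, s[i]); acc = (st, sset)
def strtosetStepP (acc : List Char × List String) (p : Int × Char) : List Char × List String :=
  if p.1 == 0 && PySem.Chars.isalpha p.2 then
    (acc.1 ++ [p.2], acc.2)
  else
    let st := if PySem.Chars.isalpha p.2 then acc.1 ++ [p.2] else []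
    if st.length == 2 then ([p.2], acc.2 ++ [String.ofList st])
    else (st, acc.2)

def strtoset (s : String) : List String :=
  let t := (PySem.Str.lower s).toList
  ((PySem.List.pyRange 0 (PySem.List.len t) 1).foldl
      (fun acc i => strtosetStepP acc (i, PySem.List.pyGetD t i ' ')) ([], [])).2

-- ===== PORT B =====
def strtoset_alt (s : String) : List String :=
  let t := (PySem.Str.lower s).toList
  ((t.zip (PySem.List.slice t (some 1) none)).filter
      (fun p => PySem.Chars.isalpha p.1 && PySem.Chars.isalpha p.2)).map
    (fun p => String.ofList [p.1, p.2])

-- ===== PRECONDITION & SPEC =====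
def Spec_strtoset (s : String) (out : List String) : Prop := out = strtoset_alt s
instance (s : String) (out : List String) : Decidable (Spec_strtoset s out) := by unfold Spec_strtoset; infer_instance

-- ===== CLAIM (what is proved, stated in full; the proofs are below) =====
def Claim_equal_strtoset : Prop := ∀ (s : String), Dom_strtoset s → Spec_strtoset s (strtoset s)

-- ===== LEMMAS AND PROOFS =====

-- the bigrams of adjacent alphabetic pairs of xs (B's value on the lowered character list)
def pairsOf (xs : List Char) : List String :=
  ((xs.zip xs.tail).filter (fun p => PySem.Chars.isalpha p.1 && PySem.Chars.isalpha p.2)).map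
    (fun p => String.ofList [p.1, p.2])

theorem alt_eq_pairsOf (s : String) :
    strtoset_alt s = pairsOf (PySem.Str.lower s).toList := by
  simp [strtoset_alt, pairsOf, PySem.List.slice_from_one]

-- invariant of A's loop after the first character: the pending accumulator is
-- [c] iff the previous character c was alphabetic, and the output so far plus
-- the bigrams contributed by the remaining fold is sset ++ pairsOf (c :: cs)
theorem foldA_inv (cs : List Char) : ∀ (i : Int), 1 ≤ i → ∀ (c : Char) (sset : List String),
    ((PySem.List.enumerate cs i).foldl strtosetStepP
        (if PySem.Chars.isalpha c then [c] else [], sset)).2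
      = sset ++ pairsOf (c :: cs) := by
  induction cs with
  | nil =>
      intro i hi c sset
      simp [PySem.List.enumerate_nil, pairsOf]
  | cons c' cs' ih =>
      intro i hi c sset
      have hne : (i == 0) = false := beq_eq_false_iff_ne.mpr (by omega)
      rw [PySem.List.enumerate_cons, List.foldl_cons]
      by_cases ha' : PySem.Chars.isalpha c' = true
      · by_cases ha : PySem.Chars.isalpha c = true
        · have h1 : strtosetStepP (if PySem.Chars.isalpha c then [c] else [], sset) (i, c')
              = (if PySem.Chars.isalpha c' then [c'] else [], sset ++ [String.ofList [c, c']]) := by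
            simp [strtosetStepP, hne, ha, ha']
          rw [h1, ih (i + 1) (by omega) c' (sset ++ [String.ofList [c, c']])]
          simp [pairsOf, ha, ha']
        · have h1 : strtosetStepP (if PySem.Chars.isalpha c then [c] else [], sset) (i, c')
              = (if PySem.Chars.isalpha c' then [c'] else [], sset) := by
            simp [strtosetStepP, hne, ha, ha']
          rw [h1, ih (i + 1) (by omega) c' sset]
          simp [pairsOf, ha, ha']
      · have h1 : strtosetStepP (if PySem.Chars.isalpha c then [c] else [], sset) (i, c')
            = (if PySem.Chars.isalpha c' then [c'] else [], sset) := by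
          simp [strtosetStepP, hne, ha']
        rw [h1, ih (i + 1) (by omega) c' sset]
        simp [pairsOf, ha']

theorem strtoset_eq_pairsOf (s : String) :
    strtoset s = pairsOf (PySem.Str.lower s).toList := by
  show ((PySem.List.pyRange 0 (PySem.List.len (PySem.Str.lower s).toList) 1).foldl
      (fun acc i => strtosetStepP acc (i, PySem.List.pyGetD (PySem.Str.lower s).toList i ' '))
      ([], [])).2 = _
  rw [show (PySem.List.pyRange 0 (PySem.List.len (PySem.Str.lower s).toList) 1).foldl
        (fun acc i => strtosetStepP acc (i, PySem.List.pyGetD (PySem.Str.lower s).toList i ' '))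
        ([], [])
      = (PySem.List.enumerate (PySem.Str.lower s).toList 0).foldl strtosetStepP ([], []) by
    rw [PySem.List.enumerate_eq_map_pyRange (d := ' '), List.foldl_map]]
  cases ht : (PySem.Str.lower s).toList with
  | nil => simp [PySem.List.enumerate_nil, pairsOf]
  | cons c cs =>
      rw [PySem.List.enumerate_cons, List.foldl_cons]
      have h0 : strtosetStepP ([], []) (0, c)
          = (if PySem.Chars.isalpha c then [c] else [], []) := by
        by_cases ha : PySem.Chars.isalpha c = true <;> simp [strtosetStepP, ha]
      rw [h0, foldA_inv cs (0 + 1) (by omega) c []]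
      simp

-- ===== VERDICT (by name: the statement is the Claim_ definition above) =====
theorem strtoset_spec : Claim_equal_strtoset := by
  intro s _
  unfold Spec_strtoset
  rw [alt_eq_pairsOf, strtoset_eq_pairsOf]
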